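-- pv_equiv track=rewrite | github.com/eerimoq/simba | bin/spc5tool.py | crc_ccitt
-- ===== SOURCE A (Python) =====
-- def crc_ccitt(data):
--     """Calculate a CRC of given data.
--
--     """
--
--     msb = 0xff
--     lsb = 0xff
--
--     for c in bytearray(data):
--         x = c ^ msb
--         x ^= (x >> 4)
--         msb = (lsb ^ (x >> 3) ^ (x << 4)) & 255
--         lsb = (x ^ (x << 5)) & 255
--
--     return (msb << 8) + lsb
-- ===== SOURCE B (Python) =====
-- def crc_ccitt(data):
--     """Calculate a CRC of given data."""
--     crc = 0xFFFF
--     for byte in bytearray(data):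
--         crc ^= byte << 8
--         for _ in range(8):
--             if crc & 0x8000:
--                 crc = ((crc << 1) ^ 0x1021) & 0xFFFF
--             else:
--                 crc = (crc << 1) & 0xFFFF
--     return crc
-- ===== Notes on version B (the rewrite author's own statement) =====
-- stated objective: idiomatic
-- what changed: Replaced A's compressed per-byte closed-form CRC update on a split (msb, lsb) state by the textbook bit-by-bit CRC-CCITT: a single 16-bit register initialised to 0xFFFF, per byte crc ^= byte << 8 followed by eight shift-and-conditionally-xor-0x1021 steps.
import Mathlib
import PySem

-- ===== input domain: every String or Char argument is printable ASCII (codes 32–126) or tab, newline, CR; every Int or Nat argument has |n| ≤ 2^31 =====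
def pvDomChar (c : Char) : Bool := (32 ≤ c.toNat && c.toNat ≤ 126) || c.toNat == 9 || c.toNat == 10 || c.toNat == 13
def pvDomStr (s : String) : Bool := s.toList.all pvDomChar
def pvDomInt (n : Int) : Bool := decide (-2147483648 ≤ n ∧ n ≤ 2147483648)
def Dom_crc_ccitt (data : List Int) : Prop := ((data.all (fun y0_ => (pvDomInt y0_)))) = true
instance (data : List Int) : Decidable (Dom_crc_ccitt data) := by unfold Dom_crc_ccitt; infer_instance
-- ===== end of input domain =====

-- B replaces A's per-byte closed-form update of a split (msb, lsb) state by the textbook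
-- bit-by-bit CRC-CCITT (one 16-bit register, 8 shift/conditional-xor-0x1021 steps per byte);
-- same cost class, chosen for idiomatic clarity.

-- ===== PORT A =====
-- per-byte body of A's for loop (state = (msb, lsb))
def crcByteA (p : Int × Int) (c : Int) : Int × Int :=
  let x := PySem.Int.bxor c p.1
  let x := PySem.Int.bxor x (x >>> (4:ℕ))
  (PySem.Int.band (PySem.Int.bxor (PySem.Int.bxor p.2 (x >>> (3:ℕ))) (x <<< (4:ℕ))) 255,
   PySem.Int.band (PySem.Int.bxor x (x <<< (5:ℕ))) 255)

def crc_ccitt (data : List Int) : Int :=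
  let p := data.foldl crcByteA (0xff, 0xff)
  (p.1 <<< (8:ℕ)) + p.2

-- ===== PORT B =====
-- body of Source B's inner 8-step bit loop
def crcBitStep (crc : Int) : Int :=
  if PySem.Int.band crc 0x8000 ≠ 0 then
    PySem.Int.band (PySem.Int.bxor (crc <<< (1:ℕ)) 0x1021) 0xFFFF
  else
    PySem.Int.band (crc <<< (1:ℕ)) 0xFFFF

def crc_ccitt_alt (data : List Int) : Int :=
  data.foldl
    (fun (crc c : Int) => (List.range 8).foldl (fun s _ => crcBitStep s) (PySem.Int.bxor crc (c <<< (8:ℕ))))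
    0xFFFF

-- ===== PRECONDITION & SPEC =====
-- Pre_ excludes exactly the inputs on which bytearray(data) raises ValueError in BOTH
-- programs: some element outside 0..255.
def Pre_crc_ccitt (data : List Int) : Prop := ∀ c ∈ data, 0 ≤ c ∧ c < 256
instance (data : List Int) : Decidable (Pre_crc_ccitt data) := by unfold Pre_crc_ccitt; infer_instance
def pvWitness_crc_ccitt : List Int := [72, 101, 0, 255]
def Spec_crc_ccitt (data : List Int) (out : Int) : Prop := out = crc_ccitt_alt data
instance (data : List Int) (out : Int) : Decidable (Spec_crc_ccitt data out) := by unfold Spec_crc_ccitt; infer_instance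

-- ===== CLAIM (what is proved, stated in full; the proofs are below) =====
def Claim_equal_crc_ccitt : Prop := ∀ (data : List Int), Dom_crc_ccitt data → Pre_crc_ccitt data → Spec_crc_ccitt data (crc_ccitt data)

-- ===== LEMMAS AND PROOFS =====

-- Nat shadows of the two per-byte transitions
def nStepA (p : ℕ × ℕ) (c : ℕ) : ℕ × ℕ :=
  let x := c ^^^ p.1
  let x := x ^^^ (x >>> 4)
  ((p.2 ^^^ (x >>> 3) ^^^ (x <<< 4)) &&& 255, (x ^^^ (x <<< 5)) &&& 255)

def nStep (s : ℕ) : ℕ :=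
  if s &&& 0x8000 ≠ 0 then ((s <<< 1) ^^^ 0x1021) &&& 0xFFFF else (s <<< 1) &&& 0xFFFF

def nF (s : ℕ) : ℕ := (List.range 8).foldl (fun t _ => nStep t) s

def nStepB (crc c : ℕ) : ℕ := nF (crc ^^^ (c <<< 8))

-- the two closed forms of A's per-byte update, as functions of x = c ^^^ msb
def newM0 (x : ℕ) : ℕ := (((x ^^^ (x >>> 4)) >>> 3) ^^^ ((x ^^^ (x >>> 4)) <<< 4)) &&& 255
def newL (x : ℕ) : ℕ := ((x ^^^ (x >>> 4)) ^^^ ((x ^^^ (x >>> 4)) <<< 5)) &&& 255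

-- cast bridges (Int ports ↦ Nat shadows)
theorem shlCast (m k : ℕ) : ((m:ℤ) <<< k) = ((m <<< k : ℕ) : ℤ) := Int.mem_toNat?.mp rfl
theorem shrCast (m k : ℕ) : ((m:ℤ) >>> k) = ((m >>> k : ℕ) : ℤ) := Int.mem_toNat?.mp rfl

theorem stepA_cast (p : ℕ × ℕ) (c : ℕ) :
    crcByteA ((p.1:ℤ), (p.2:ℤ)) (c:ℤ) = (((nStepA p c).1 : ℤ), ((nStepA p c).2 : ℤ)) := by
  simp only [crcByteA, nStepA, shlCast, shrCast,
    show (255:ℤ) = ((255:ℕ):ℤ) from rfl,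
    PySem.Int.bxor_natCast, PySem.Int.band_natCast]

theorem stepB_cast (s : ℕ) : crcBitStep (s:ℤ) = ((nStep s : ℕ) : ℤ) := by
  simp only [crcBitStep, nStep, shlCast,
    show (0x8000:ℤ) = ((0x8000:ℕ):ℤ) from rfl, show (0x1021:ℤ) = ((0x1021:ℕ):ℤ) from rfl,
    show (0xFFFF:ℤ) = ((0xFFFF:ℕ):ℤ) from rfl,
    PySem.Int.bxor_natCast, PySem.Int.band_natCast, ne_eq, Int.natCast_eq_zero]
  split_ifs <;> rfl

theorem F_cast (s : ℕ) : (List.range 8).foldl (fun t _ => crcBitStep t) ((s:ℕ):ℤ) = ((nF s : ℕ) : ℤ) := by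
  simp only [nF, show List.range 8 = [0,1,2,3,4,5,6,7] from rfl, List.foldl, stepB_cast]

-- bitwise helper lemmas
theorem and_hi (n : ℕ) : (n &&& 0x8000 ≠ 0) ↔ n.testBit 15 = true := by
  rw [show (0x8000:ℕ) = 2^15 from rfl, Nat.and_two_pow]
  cases h : n.testBit 15 <;> simp

theorem xor_left_comm' (a b c : ℕ) : a ^^^ (b ^^^ c) = b ^^^ (a ^^^ c) := by
  rw [← Nat.xor_assoc, Nat.xor_comm a b, Nat.xor_assoc]

theorem step_xor (a b : ℕ) : nStep (a ^^^ b) = nStep a ^^^ nStep b := by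
  simp only [nStep, and_hi, Nat.testBit_xor]
  by_cases ha : a.testBit 15 = true <;> by_cases hb : b.testBit 15 = true <;>
    simp [ha, hb, ← Nat.and_xor_distrib_right, Nat.shiftLeft_xor_distrib,
      Nat.xor_assoc, Nat.xor_comm, xor_left_comm']

theorem nF_xor (a b : ℕ) : nF (a ^^^ b) = nF a ^^^ nF b := by
  simp only [nF, show List.range 8 = [0,1,2,3,4,5,6,7] from rfl, List.foldl, step_xor]

set_option maxRecDepth 10000 in
theorem nF_low : ∀ l : Fin 256, nF l.1 = l.1 <<< 8 := by decide

set_option maxRecDepth 10000 in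
theorem nF_high : ∀ x : Fin 256, nF (x.1 <<< 8) = (newM0 x.1) <<< 8 ^^^ newL x.1 := by decide

theorem shl_xor_eq_add (m l : ℕ) (hl : l < 256) : m <<< 8 ^^^ l = m <<< 8 + l := by
  rw [Nat.shiftLeft_add_eq_or_of_lt (show l < 2 ^ 8 from hl)]
  apply Nat.eq_of_testBit_eq
  intro i
  rcases Nat.lt_or_ge i 8 with h | h
  · simp [Nat.testBit_xor, Nat.testBit_or, Nat.testBit_shiftLeft, Nat.not_le.mpr h]
  · have h2 : (256:ℕ) ≤ 2 ^ i := by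
      calc (256:ℕ) = 2 ^ 8 := rfl
        _ ≤ 2 ^ i := Nat.pow_le_pow_right (by omega) h
    have hlb : l.testBit i = false := Nat.testBit_lt_two_pow (lt_of_lt_of_le hl h2)
    simp [Nat.testBit_xor, Nat.testBit_or, hlb]

theorem stepA_bounds (p : ℕ × ℕ) (c : ℕ) : (nStepA p c).1 < 256 ∧ (nStepA p c).2 < 256 := by
  constructor <;> exact Nat.lt_succ_of_le (Nat.and_le_right)

theorem nStepA_fst (p : ℕ × ℕ) (c : ℕ) (hl : p.2 < 256) :
    (nStepA p c).1 = p.2 ^^^ newM0 (c ^^^ p.1) := by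
  simp only [nStepA, newM0, Nat.and_xor_distrib_right, Nat.xor_assoc]
  rw [Nat.and_two_pow_sub_one_of_lt_two_pow (show p.2 < 2 ^ 8 from hl)]

theorem nStepA_snd (p : ℕ × ℕ) (c : ℕ) : (nStepA p c).2 = newL (c ^^^ p.1) := rfl

-- the per-byte equivalence on the Nat shadows
theorem byte_bridge (p : ℕ × ℕ) (c : ℕ) (hm : p.1 < 256) (hl : p.2 < 256) (hc : c < 256) :
    nStepB (p.1 <<< 8 ^^^ p.2) c = (nStepA p c).1 <<< 8 ^^^ (nStepA p c).2 := by
  have hx : c ^^^ p.1 < 256 :=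
    Nat.xor_lt_two_pow (show c < 2 ^ 8 from hc) (show p.1 < 2 ^ 8 from hm)
  have h1 : (p.1 <<< 8 ^^^ p.2) ^^^ (c <<< 8) = ((c ^^^ p.1) <<< 8) ^^^ p.2 := by
    simp [Nat.shiftLeft_xor_distrib, Nat.xor_comm, xor_left_comm']
  rw [nStepB, h1, nF_xor, nF_high ⟨c ^^^ p.1, hx⟩, nF_low ⟨p.2, hl⟩,
    nStepA_fst p c hl, nStepA_snd, Nat.shiftLeft_xor_distrib]
  simp [Nat.xor_comm, xor_left_comm']

-- fold-level equivalence on the Nat shadows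
theorem fold_bridge (cs : List ℕ) (h : ∀ c ∈ cs, c < 256) (p : ℕ × ℕ)
    (hm : p.1 < 256) (hl : p.2 < 256) :
    cs.foldl nStepB (p.1 <<< 8 ^^^ p.2) =
      (cs.foldl nStepA p).1 <<< 8 ^^^ (cs.foldl nStepA p).2 := by
  induction cs generalizing p with
  | nil => rfl
  | cons c cs ih =>
    have hc : c < 256 := h c (by simp)
    have hb := stepA_bounds p c
    simp only [List.foldl]
    rw [byte_bridge p c hm hl hc]
    exact ih (fun d hd => h d (by simp [hd])) (nStepA p c) hb.1 hb.2

-- fold-level cast bridges (Int ports to Nat shadows)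
theorem A_fold_cast (xs : List Int) (h : ∀ c ∈ xs, 0 ≤ c ∧ c < 256) (p : ℕ × ℕ) :
    xs.foldl crcByteA ((p.1:ℤ), (p.2:ℤ)) =
      ((((xs.map Int.toNat).foldl nStepA p).1 : ℤ), (((xs.map Int.toNat).foldl nStepA p).2 : ℤ)) := by
  induction xs generalizing p with
  | nil => rfl
  | cons c cs ih =>
    have hc := h c (by simp)
    have hcast : c = ((c.toNat : ℕ) : ℤ) := (Int.toNat_of_nonneg hc.1).symm
    simp only [List.foldl, List.map]
    rw [hcast, stepA_cast p c.toNat]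
    exact ih (fun d hd => h d (by simp [hd])) (nStepA p c.toNat)

theorem B_fold_cast (xs : List Int) (h : ∀ c ∈ xs, 0 ≤ c ∧ c < 256) (s : ℕ) :
    xs.foldl
      (fun (crc c : Int) => (List.range 8).foldl (fun t _ => crcBitStep t) (PySem.Int.bxor crc (c <<< (8:ℕ))))
      ((s:ℕ):ℤ) = (((xs.map Int.toNat).foldl nStepB s : ℕ) : ℤ) := by
  induction xs generalizing s with
  | nil => rfl
  | cons c cs ih =>
    have hc := h c (by simp)
    have hcast : c = ((c.toNat : ℕ) : ℤ) := (Int.toNat_of_nonneg hc.1).symm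
    simp only [List.foldl, List.map]
    rw [hcast, shlCast, PySem.Int.bxor_natCast, F_cast]
    exact ih (fun d hd => h d (by simp [hd])) _

theorem fold_bounds (cs : List ℕ) (p : ℕ × ℕ) (hm : p.1 < 256) (hl : p.2 < 256) :
    (cs.foldl nStepA p).1 < 256 ∧ (cs.foldl nStepA p).2 < 256 := by
  induction cs generalizing p with
  | nil => exact ⟨hm, hl⟩
  | cons c cs ih =>
    have hb := stepA_bounds p c
    exact ih (nStepA p c) hb.1 hb.2

-- ===== VERDICT (by name: the statement is the Claim_ definition above) =====
theorem crc_ccitt_spec : Claim_equal_crc_ccitt := by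
  intro data _ hpre
  unfold Spec_crc_ccitt crc_ccitt crc_ccitt_alt
  rw [show ((0xff:ℤ), (0xff:ℤ)) = (((255:ℕ):ℤ), ((255:ℕ):ℤ)) from rfl,
    A_fold_cast data hpre (255, 255),
    show (0xFFFF:ℤ) = ((0xFFFF:ℕ):ℤ) from rfl,
    B_fold_cast data hpre 0xFFFF]
  have hb := fold_bounds (data.map Int.toNat) (255, 255) (by omega) (by omega)
  rw [show (0xFFFF:ℕ) = 255 <<< 8 ^^^ 255 from rfl,
    fold_bridge (data.map Int.toNat)
      (by intro c hc; rcases List.mem_map.mp hc with ⟨d, hd, rfl⟩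
          have := hpre d hd; omega)
      (255, 255) (by omega) (by omega),
    shl_xor_eq_add _ _ hb.2]
  simp [Int.natCast_shiftLeft]
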